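-- pv_equiv track=rewrite | github.com/tankh99/Leetcode | rijeci.py | rijeci
-- ===== SOURCE A (Python) =====
-- map = {}
--
-- def build_str(k):
--     if k == 0:
--         return "A"
--     if k == 1:
--         return "B"
--     elif k in map:
--         return map[k]
--     val = build_str(k-1) + build_str(k-2)
--     map[k] = val
--     return map[k]
--
-- def rijeci(k):
--     string = "A"
--     string = build_str(k)
--     a_count, b_count = 0, 0
--     for c in string:
--         if c == "A":
--             a_count += 1
--         elif c == "B":
--             b_count += 1
--     return a_count, b_count
-- ===== SOURCE B (Python) =====
-- def rijeci(k):
--     # Fibonacci recurrence on (a_count, b_count) directly; no string built.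
--     if k == 0:
--         return (1, 0)
--     prev, cur = (1, 0), (0, 1)   # counts for the first two words
--     for _ in range(k - 1):
--         prev, cur = cur, (cur[0] + prev[0], cur[1] + prev[1])
--     return cur
-- ===== Notes on version B (the rewrite author's own statement) =====
-- stated objective: faster
-- what changed: B replaces building the exponential-length Fibonacci word and scanning it with the Fibonacci recurrence on the (A-count, B-count) pairs themselves, iterated k-1 times.
import Mathlib
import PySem

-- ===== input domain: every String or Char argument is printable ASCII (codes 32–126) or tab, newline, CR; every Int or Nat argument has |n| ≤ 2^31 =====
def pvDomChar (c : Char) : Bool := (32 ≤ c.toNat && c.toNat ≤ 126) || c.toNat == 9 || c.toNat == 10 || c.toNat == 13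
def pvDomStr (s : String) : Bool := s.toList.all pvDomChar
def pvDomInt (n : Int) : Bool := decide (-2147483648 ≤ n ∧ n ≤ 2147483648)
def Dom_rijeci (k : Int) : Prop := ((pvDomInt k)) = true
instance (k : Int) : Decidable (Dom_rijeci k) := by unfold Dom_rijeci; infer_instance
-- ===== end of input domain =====

-- B builds no string: it iterates the Fibonacci recurrence on the (A-count, B-count) pairs (objective: faster, asymptotically).

-- ===== PORT A =====
-- build_str(k) as a Nat-indexed recursion (the Python memo map is a pure cache and does
-- not change the value); characters as List Char.
def buildStrA : Nat → List Char
  | 0 => ['A']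
  | 1 => ['B']
  | n + 2 => buildStrA (n + 1) ++ buildStrA n

def rijeci (k : Int) : Int × Int :=
  let string := buildStrA k.toNat
  string.foldl
    (fun (p : Int × Int) c =>
      if c = 'A' then (p.1 + 1, p.2)
      else if c = 'B' then (p.1, p.2 + 1)
      else p)
    (0, 0)

-- ===== PORT B =====
def fibCounts : Nat → (Int × Int) → (Int × Int) → Int × Int
  | 0, _, cur => cur
  | n + 1, prev, cur => fibCounts n cur (cur.1 + prev.1, cur.2 + prev.2)

def rijeci_alt (k : Int) : Int × Int :=
  if k = 0 then (1, 0)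
  else fibCounts (k - 1).toNat (1, 0) (0, 1)

-- ===== PRECONDITION & SPEC =====
-- Excluded: negative k, on which Python's build_str recurses with no base case and raises RecursionError.
def Pre_rijeci (k : Int) : Prop := 0 ≤ k
instance (k : Int) : Decidable (Pre_rijeci k) := by unfold Pre_rijeci; infer_instance
def pvWitness_rijeci : Int := 7

def Spec_rijeci (k : Int) (out : Int × Int) : Prop := out = rijeci_alt k
instance (k : Int) (out : Int × Int) : Decidable (Spec_rijeci k out) := by unfold Spec_rijeci; infer_instance

-- ===== CLAIM (what is proved, stated in full; the proofs are below) =====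
def Claim_equal_rijeci : Prop := ∀ (k : Int), Dom_rijeci k → Pre_rijeci k → Spec_rijeci k (rijeci k)

-- ===== LEMMAS AND PROOFS =====

def countAB (s : List Char) : Int × Int :=
  s.foldl
    (fun (p : Int × Int) c =>
      if c = 'A' then (p.1 + 1, p.2)
      else if c = 'B' then (p.1, p.2 + 1)
      else p)
    (0, 0)

theorem countAB_foldl (s : List Char) (x y : Int) :
    s.foldl
      (fun (p : Int × Int) c =>
        if c = 'A' then (p.1 + 1, p.2)
        else if c = 'B' then (p.1, p.2 + 1)
        else p)
      (x, y) = (x + (countAB s).1, y + (countAB s).2) := by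
  induction s generalizing x y with
  | nil => simp [countAB]
  | cons c t ih =>
    simp only [countAB, List.foldl_cons]
    split_ifs <;> rw [ih, ih] <;> simp [Prod.ext_iff] <;> omega

theorem countAB_append (s t : List Char) :
    countAB (s ++ t) = ((countAB s).1 + (countAB t).1, (countAB s).2 + (countAB t).2) := by
  unfold countAB
  rw [List.foldl_append]
  have := countAB_foldl t (countAB s).1 (countAB s).2
  simpa [countAB] using this

def CA (n : Nat) : Int × Int := countAB (buildStrA n)

theorem CA_succ_succ (n : Nat) :
    CA (n + 2) = ((CA (n + 1)).1 + (CA n).1, (CA (n + 1)).2 + (CA n).2) := by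
  simp [CA, buildStrA, countAB_append]

theorem fibCounts_CA (n m : Nat) :
    fibCounts n (CA m) (CA (m + 1)) = CA (m + 1 + n) := by
  induction n generalizing m with
  | zero => simp [fibCounts]
  | succ n ih =>
    have : fibCounts (n + 1) (CA m) (CA (m + 1))
        = fibCounts n (CA (m + 1)) ((CA (m + 1)).1 + (CA m).1, (CA (m + 1)).2 + (CA m).2) := rfl
    rw [this, ← CA_succ_succ m, ih (m + 1)]
    congr 1
    omega

-- ===== VERDICT (by name: the statement is the Claim_ definition above) =====
theorem rijeci_spec : Claim_equal_rijeci := by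
  intro k _ hk
  unfold Pre_rijeci at hk
  unfold Spec_rijeci rijeci rijeci_alt
  by_cases h0 : k = 0
  · subst h0; decide
  · simp only [if_neg h0]
    have hCA0 : CA 0 = (1, 0) := by decide
    have hCA1 : CA 1 = (0, 1) := by decide
    rw [← hCA0, ← hCA1, fibCounts_CA]
    have hk1 : k.toNat = 0 + 1 + (k - 1).toNat := by omega
    show countAB (buildStrA k.toNat) = _
    rw [hk1]
    rfl
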